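-- pv_equiv track=rewrite | github.com/s3bw/foolscap | foolscap/parse_text.py | parse_sub_headings
-- ===== SOURCE A (Python) =====
-- def index_sub_headings(content):
--     return [index
--             for index, line in enumerate(content[2:])
--             if line and line[0] == ':']
--
-- def parse_sub_headings(content):
--     sub_headings_indexs = index_sub_headings(content)
--     return [
--         (content[index + 1], content[index + 2])
--         if content[index + 1]
--         else ('Content line {}:'.format(index + 1), content[index + 2])
--         for index in sub_headings_indexs
--     ]
-- ===== SOURCE B (Python) =====
-- def parse_sub_headings(content):
--     # Back-to-front: walk the list from the end with explicit indices,
--     # push pairs onto an accumulator, reverse once at the end.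
--     rev = []
--     j = len(content) - 1
--     while j >= 2:
--         line = content[j]
--         if line.startswith(':'):
--             prev = content[j - 1]
--             rev.append((prev, line) if prev
--                        else ('Content line {}:'.format(j - 1), line))
--         j -= 1
--     rev.reverse()
--     return rev
-- ===== Notes on version B (the rewrite author's own statement) =====
-- stated objective: alternative
-- what changed: Replaces the staged index-list comprehension plus re-indexing with a backwards while-loop that walks the list from the end building the output back-to-front on an accumulator (reversed once at the end), with no intermediate index list, slices or enumerate.
import Mathlib
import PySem

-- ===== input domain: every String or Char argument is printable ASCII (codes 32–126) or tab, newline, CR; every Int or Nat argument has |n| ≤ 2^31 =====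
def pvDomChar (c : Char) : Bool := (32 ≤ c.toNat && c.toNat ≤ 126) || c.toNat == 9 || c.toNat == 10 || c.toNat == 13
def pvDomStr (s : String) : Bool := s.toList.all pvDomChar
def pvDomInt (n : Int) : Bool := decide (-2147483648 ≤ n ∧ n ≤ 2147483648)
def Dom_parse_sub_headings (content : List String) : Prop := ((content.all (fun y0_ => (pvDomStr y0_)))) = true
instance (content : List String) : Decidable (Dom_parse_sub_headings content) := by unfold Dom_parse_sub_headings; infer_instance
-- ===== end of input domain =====

-- B walks the list backwards with explicit indices, building the output
-- back-to-front on an accumulator reversed once at the end, instead of A's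
-- index-list comprehension plus re-indexing (objective: alternative). A is total.

-- ===== PORT A =====
-- 'line and line[0] == ":"' : empty string is falsy, else compare the first character
def pvColonA (line : String) : Bool :=
  match line.toList with
  | [] => false
  | c :: _ => c == ':'

def index_sub_headings (content : List String) : List Int :=
  (PySem.List.enumerate (PySem.List.slice content (some 2) none)).filterMap
    (fun p => if pvColonA p.2 then some p.1 else none)

def parse_sub_headings (content : List String) : List (String × String) :=
  (index_sub_headings content).map (fun index =>
    -- index+1 and index+2 are always in range (index indexes content[2:]), so
    -- pyGet? is always 'some' here and the '.getD ""' default is never used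
    let a := (PySem.List.pyGet? content (index + 1)).getD ""
    let b := (PySem.List.pyGet? content (index + 2)).getD ""
    if a ≠ "" then (a, b)
    else ("Content line " ++ PySem.Int.toStr (index + 1) ++ ":", b))

-- ===== PORT B =====
-- the while loop 'while j >= 2: …; j -= 1' as recursion on j; content[j] is in
-- range whenever the loop body runs, so pyGet?'s '.getD ""' default is never used
def pvGoB (content : List String) : Nat → List (String × String) → List (String × String)
  | 0, rev => rev
  | 1, rev => rev
  | (k+2), rev =>
    let j : Nat := k + 2
    let line := (PySem.List.pyGet? content (j : Int)).getD ""
    let rev' :=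
      if PySem.Str.startswith line ":" then
        rev ++ [let prev := (PySem.List.pyGet? content ((j : Int) - 1)).getD ""
                if prev ≠ "" then (prev, line)
                else ("Content line " ++ PySem.Int.toStr ((j : Int) - 1) ++ ":", line)]
      else rev
    pvGoB content (k+1) rev'

def parse_sub_headings_alt (content : List String) : List (String × String) :=
  (pvGoB content (content.length - 1) []).reverse

-- ===== PRECONDITION & SPEC =====
def Spec_parse_sub_headings (content : List String) (out : List (String × String)) : Prop := out = parse_sub_headings_alt content
instance (content : List String) (out : List (String × String)) : Decidable (Spec_parse_sub_headings content out) := by unfold Spec_parse_sub_headings; infer_instance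

-- ===== CLAIM =====
def Claim_equal_parse_sub_headings : Prop := ∀ (content : List String), Dom_parse_sub_headings content → Spec_parse_sub_headings content (parse_sub_headings content)

-- ===== LEMMAS AND PROOFS =====

-- the pair (if any) contributed by index j (2 ≤ j < length)
def pairAt (content : List String) (j : Nat) : List (String × String) :=
  let line := (PySem.List.pyGet? content (j : Int)).getD ""
  if PySem.Str.startswith line ":" then
    let prev := (PySem.List.pyGet? content ((j : Int) - 1)).getD ""
    [if prev ≠ "" then (prev, line)
     else ("Content line " ++ PySem.Int.toStr ((j : Int) - 1) ++ ":", line)]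
  else []

-- common front-to-back description (A reduces to it)
def goPairs (prev : String) (xs : List String) (n : Int) : List (String × String) :=
  match xs with
  | [] => []
  | l :: rest =>
    (if PySem.Str.startswith l ":" then
       [if prev ≠ "" then (prev, l) else ("Content line " ++ PySem.Int.toStr n ++ ":", l)]
     else []) ++ goPairs l rest (n + 1)

theorem cond_eq (s : String) : PySem.Str.startswith s ":" = pvColonA s := by
  simp [PySem.Str.startswith, PySem.Chars.startswith, pvColonA]
  cases s.toList with
  | nil => simp
  | cons c cs => simp [List.isPrefixOf]; exact eq_comm

theorem lemmaA (xs : List String) (pre : List String) (prev : String) (i : Nat)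
    (hlen : pre.length = i + 1) :
    ((PySem.List.enumerate xs (i : Int)).filterMap
        (fun p => if pvColonA p.2 then some p.1 else none)).map
      (fun index =>
        let a := (PySem.List.pyGet? (pre ++ prev :: xs) (index + 1)).getD ""
        let b := (PySem.List.pyGet? (pre ++ prev :: xs) (index + 2)).getD ""
        if a ≠ "" then (a, b)
        else ("Content line " ++ PySem.Int.toStr (index + 1) ++ ":", b))
      = goPairs prev xs ((i : Int) + 1) := by
  induction xs generalizing pre prev i with
  | nil => simp [PySem.List.enumerate, goPairs]
  | cons l rest ih =>
    rw [PySem.List.enumerate_cons, List.filterMap_cons]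
    simp only [goPairs]
    have h1 : PySem.List.pyGet? (pre ++ prev :: l :: rest) ((i : Int) + 1) = some prev := by
      have : ((i : Int) + 1) = (pre.length : Int) := by omega
      rw [this, PySem.List.pyGet?_append_length]
    have h2 : PySem.List.pyGet? (pre ++ prev :: l :: rest) ((i : Int) + 2) = some l := by
      have hassoc : pre ++ prev :: l :: rest = (pre ++ [prev]) ++ l :: rest := by simp
      have : ((i : Int) + 2) = (((pre ++ [prev]).length : Nat) : Int) := by
        simp [hlen]; omega
      rw [hassoc, this, PySem.List.pyGet?_append_length]
    have ihk := ih (pre ++ [prev]) l (i + 1) (by simp [hlen])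
    have hcast : ((i : Int) + 1) = (((i + 1 : Nat)) : Int) := by push_cast; ring
    have hassoc : (pre ++ [prev]) ++ l :: rest = pre ++ prev :: l :: rest := by simp
    rw [← hcast, hassoc] at ihk
    rw [cond_eq l]
    by_cases h : pvColonA l = true
    · simp only [h, if_true, List.map_cons, h1, h2, Option.getD_some, ihk]
      simp
    · simp [h]
      simpa using ihk

-- goPairs started at index j equals the flatMap of pairAt over the remaining indices
theorem lemmaG (content : List String) (m : Nat) :
    ∀ j, 2 ≤ j → j + m = content.length →
    goPairs ((PySem.List.pyGet? content ((j : Int) - 1)).getD "") (content.drop j) ((j : Int) - 1)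
      = (List.range' j m).flatMap (pairAt content) := by
  induction m with
  | zero =>
    intro j _ hj
    have hd : content.drop j = [] := List.drop_eq_nil_of_le (by omega)
    rw [hd]
    simp [goPairs]
  | succ m ih =>
    intro j hj2 hj
    have hjlt : j < content.length := by omega
    have hdrop : content.drop j = content[j] :: content.drop (j + 1) :=
      List.drop_eq_getElem_cons hjlt
    have hget : (PySem.List.pyGet? content ((j : Int))).getD "" = content[j] := by
      rw [PySem.List.pyGet?_natCast]
      simp [hjlt]
    have hget1 : (PySem.List.pyGet? content (((j : Int) + 1) - 1)).getD "" = content[j] := by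
      rw [show ((j : Int) + 1) - 1 = (j : Int) by ring, hget]
    have hih := ih (j + 1) (by omega) (by omega)
    have e : ((j + 1 : Nat) : Int) - 1 = (j : Int) := by push_cast; ring
    rw [e, hget] at hih
    rw [hdrop]
    simp only [goPairs]
    rw [List.range'_succ, List.flatMap_cons]
    rw [show ((j : Int) - 1) + 1 = (j : Int) by ring]
    rw [hih]
    congr 1
    simp only [pairAt, hget]

-- the backwards loop builds the reverse of the same flatMap in front of its accumulator
theorem lemmaU (content : List String) :
    ∀ j rev, pvGoB content j rev
      = rev ++ ((List.range' 2 (j - 1)).flatMap (pairAt content)).reverse := by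
  intro j
  induction j using Nat.strong_induction_on with
  | _ j ih =>
    intro rev
    match j with
    | 0 => simp [pvGoB]
    | 1 => simp [pvGoB]
    | (k+2) =>
      have hstep := ih (k+1) (by omega)
      simp only [pvGoB]
      rw [hstep]
      have hr : List.range' 2 ((k+2) - 1) = List.range' 2 ((k+1) - 1) ++ [2 + k] := by
        have h1 : (k+2) - 1 = k + 1 := by omega
        have h2 : (k+1) - 1 = k := by omega
        rw [h1, h2, List.range'_1_concat]
      rw [hr, List.flatMap_append, List.reverse_append]
      simp only [List.flatMap_cons, List.flatMap_nil, List.append_nil]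
      have h2k : (2 + k) = (k + 2) := by omega
      rw [h2k]
      simp only [pairAt]
      split
      · simp
      · simp

theorem slice2_eq (content : List String) :
    PySem.List.slice content (some 2) none = content.drop 2 := by
  have h2 : (2:Int) = ((2:Nat):Int) := by norm_num
  rw [h2, PySem.List.slice_from_natCast]

-- ===== VERDICT =====
theorem parse_sub_headings_spec : Claim_equal_parse_sub_headings := by
  intro content _
  unfold Spec_parse_sub_headings parse_sub_headings parse_sub_headings_alt index_sub_headings
  rw [slice2_eq]
  match content with
  | [] => simp [pvGoB]
  | [a] => simp [pvGoB]
  | a :: b :: rest =>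
    have hA := lemmaA rest [a] b 0 (by simp)
    rw [show ((0 : Nat) : Int) = (0 : Int) by norm_num] at hA
    rw [show ((0:Int) + 1) = (1:Int) by norm_num] at hA
    rw [show ([a] ++ b :: rest) = a :: b :: rest by simp] at hA
    have hG := lemmaG (a :: b :: rest) rest.length 2 (by omega)
      (by simp only [List.length_cons]; omega)
    have hpb : (PySem.List.pyGet? (a :: b :: rest) (((2 : Nat) : Int) - 1)).getD "" = b := by
      rw [show (((2 : Nat) : Int) - 1) = ((1 : Nat) : Int) by norm_num, PySem.List.pyGet?_natCast]
      simp
    rw [hpb, show (((2 : Nat) : Int) - 1) = (1 : Int) by norm_num,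
        List.drop_succ_cons, List.drop_succ_cons, List.drop_zero] at hG
    have hU := lemmaU (a :: b :: rest) ((a :: b :: rest).length - 1) []
    have hlen : (a :: b :: rest).length - 1 - 1 = rest.length := by
      simp only [List.length_cons]; omega
    rw [hlen, List.nil_append] at hU
    simp only [List.drop_succ_cons, List.drop_zero] at hA ⊢
    rw [hA, hU, List.reverse_reverse, hG]
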